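-- pv_equiv track=rewrite | github.com/RayLee1101/Codespace | 1A2B_2.py | many_arr
-- ===== SOURCE A (Python) =====
-- def many_arr(data):
--     re = ""
--     # for i in range(4):
--     #     dicts = {}
--     #     for j in data:
--     #         if j[i] in dicts:
--     #             dicts[j[i]] += 1
--     #         else:
--     #             dicts[f"{j[i]}"] = 1
--     #     # sorted(dicts.keys(), reversed = True)
--     #     dicts = {key: dicts[key] for key in sorted(dicts.keys(), reverse=True)}
--     #     for j in range(4):
--     #         if list(dicts.keys())[j] not in re:
--     #             re += list(dicts.keys())[j]
--     #             break
--     # return re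
--     for i in range(4):
--         dicts = {}
--         for j in data:
--             if j[i] in dicts:
--                 dicts[j[i]] += 1
--             else:
--                 dicts[j[i]] = 1
--         for key in sorted(dicts.keys(), key=lambda k: dicts[k]):
--             temp_re = re + key
--             if any(item.startswith(temp_re) for item in data):
--                 re += key
--                 break
--     return re
-- ===== SOURCE B (Python) =====
-- def many_arr(data):
--     res = []
--     candidates = data
--     for i in range(4):
--         counts = {}
--         order = {}
--         for item in data:
--             c = item[i]
--             counts[c] = counts.get(c, 0) + 1
--             if c not in order:
--                 order[c] = len(order)
--         best = None
--         for item in candidates: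
--             c = item[i]
--             key = (counts[c], order[c])
--             if best is None or key < best[0]:
--                 best = (key, c)
--         if best is not None:
--             c = best[1]
--             res.append(c)
--             candidates = [item for item in candidates if item[i] == c]
--     return "".join(res)
-- ===== Notes on version B (the rewrite author's own statement) =====
-- stated objective: alternative
-- what changed: B keeps a progressively filtered candidate list and picks each character by a single-pass argmin on the key (global frequency, first-appearance rank), eliminating A's per-position stable sort and its repeated any(startswith) rescans of the whole list for every sorted key.
import Mathlib
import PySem

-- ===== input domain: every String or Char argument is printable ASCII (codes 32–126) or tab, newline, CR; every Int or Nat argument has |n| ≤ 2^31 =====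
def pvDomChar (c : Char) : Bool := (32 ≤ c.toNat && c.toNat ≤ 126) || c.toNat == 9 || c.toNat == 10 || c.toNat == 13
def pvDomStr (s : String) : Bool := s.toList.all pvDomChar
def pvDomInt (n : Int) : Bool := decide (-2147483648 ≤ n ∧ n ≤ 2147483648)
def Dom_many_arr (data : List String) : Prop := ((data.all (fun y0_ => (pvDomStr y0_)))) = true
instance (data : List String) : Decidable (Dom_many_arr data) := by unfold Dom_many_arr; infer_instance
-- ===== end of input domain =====

-- B replaces A's per-position stable sort plus repeated `any(startswith)` rescans of all of
-- `data` by a maintained candidate list and a single-pass argmin on the key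
-- (frequency, first-appearance rank); same return value on Pre_ (objective: alternative).

-- ===== PORT A =====
-- loop body of A's `for i in range(4)`; `for key in sorted(...): ... break` is find?
def stepA (data : List String) (re : List Char) (i : Int) : List Char :=
  let dicts := data.foldl (fun d j =>
      match PySem.Str.pyGet? j i with      -- j[i]; none = IndexError, excluded by Pre_
      | some c => if d.contains c then d.modify c 0 (· + 1) else d.insert c 1
      | none => d) (PySem.Dict.empty : PySem.Dict Char Int)
  match (PySem.List.sorted dicts.keys (fun k => dicts.getD k 0) false).find?
      (fun key => data.any (fun item => PySem.Chars.startswith item.toList (re ++ [key]))) with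
  | some key => re ++ [key]
  | none => re

def many_arr (data : List String) : String :=
  String.ofList ((PySem.List.pyRange 0 4 1).foldl (stepA data) [])

-- ===== PORT B =====
-- loop body of B's `for i in range(4)`: state = (res, candidates)
def stepB (data : List String) (st : List Char × List String) (i : Int) : List Char × List String :=
  let cd := data.foldl (fun (cd : PySem.Dict Char Int × PySem.Dict Char Int) item =>
      match PySem.Str.pyGet? item i with   -- item[i]; none = IndexError, excluded by Pre_
      | some c =>
          (cd.1.insert c (cd.1.getD c 0 + 1),
           if cd.2.contains c then cd.2 else cd.2.insert c (cd.2.size : Int))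
      | none => cd) (PySem.Dict.empty, PySem.Dict.empty)
  let best := st.2.foldl (fun (b : Option ((Int × Int) × Char)) item =>
      match PySem.Str.pyGet? item i with   -- item[i]; none = IndexError, excluded by Pre_
      | some c =>
          let k : Int × Int := (cd.1.getD c 0, cd.2.getD c 0)
          match b with
          | none => some (k, c)
          | some (bk, bc) =>
              if k.1 < bk.1 ∨ (k.1 = bk.1 ∧ k.2 < bk.2) then some (k, c) else some (bk, bc)
      | none => b) none
  match best with
  | some (_, c) => (st.1 ++ [c], st.2.filter (fun item => PySem.Str.pyGet? item i == some c))
  | none => st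

def many_arr_alt (data : List String) : String :=
  String.ofList (((PySem.List.pyRange 0 4 1).foldl (stepB data) ([], data)).1)

-- ===== PRECONDITION & SPEC =====
-- Pre_ excludes exactly the inputs on which A raises IndexError: some item shorter than 4 chars.
def Pre_many_arr (data : List String) : Prop := ∀ s ∈ data, 4 ≤ s.toList.length
instance (data : List String) : Decidable (Pre_many_arr data) := by unfold Pre_many_arr; infer_instance
def pvWitness_many_arr : List String := ["abcd", "abce", "bbcd"]

def Spec_many_arr (data : List String) (out : String) : Prop := out = many_arr_alt data
instance (data : List String) (out : String) : Decidable (Spec_many_arr data out) := by unfold Spec_many_arr; infer_instance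

-- ===== CLAIM (what is proved, stated in full; the proofs are below) =====
def Claim_equal_many_arr : Prop := ∀ (data : List String), Dom_many_arr data → Pre_many_arr data → Spec_many_arr data (many_arr data)

-- ===== LEMMAS AND PROOFS =====

-- char of s at position n (used only under `n < s.toList.length`)
def chAt (n : Nat) (s : String) : Char := s.toList.getD n ' '

lemma pyGet?_chAt (s : String) (n : Nat) (h : n < s.toList.length) :
    PySem.Str.pyGet? s (n : Int) = some (chAt n s) := by
  simp [chAt, List.getElem?_eq_getElem h, List.getD_eq_getElem?_getD]

-- strict lexicographic order on (count, rank)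
def LexR (cnt : Char → Int) (rk : Char → Nat) (a b : Char) : Prop :=
  cnt a < cnt b ∨ (cnt a = cnt b ∧ rk a < rk b)

-- ## stability of PySem's insertion sort, expressed via a rank function
lemma insertBy_pairwise (cnt : Char → Int) (rk : Char → Nat) (x : Char) (acc : List Char)
    (hacc : acc.Pairwise (LexR cnt rk)) (hlt : ∀ y ∈ acc, rk y < rk x) :
    (PySem.List.insertBy (fun a b => decide (cnt a < cnt b)) x acc).Pairwise (LexR cnt rk) := by
  induction acc with
  | nil => simp [PySem.List.insertBy]
  | cons y ys ih =>
    rw [List.pairwise_cons] at hacc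
    obtain ⟨hy, hys⟩ := hacc
    by_cases h : cnt x < cnt y
    · rw [show PySem.List.insertBy (fun a b => decide (cnt a < cnt b)) x (y :: ys)
            = x :: y :: ys by simp [PySem.List.insertBy, h]]
      refine List.pairwise_cons.mpr ⟨?_, List.pairwise_cons.mpr ⟨hy, hys⟩⟩
      intro z hz
      rcases List.mem_cons.mp hz with rfl | hz
      · exact Or.inl h
      · refine Or.inl ?_
        rcases hy z hz with h2 | ⟨h2, _⟩
        · omega
        · omega
    · rw [show PySem.List.insertBy (fun a b => decide (cnt a < cnt b)) x (y :: ys)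
            = y :: PySem.List.insertBy (fun a b => decide (cnt a < cnt b)) x ys by
          simp [PySem.List.insertBy, h]]
      refine List.pairwise_cons.mpr ⟨?_, ih hys (fun z hz => hlt z (List.mem_cons_of_mem _ hz))⟩
      intro z hz
      rcases (PySem.List.mem_insertBy _ _ _ _).mp hz with rfl | hz
      · by_cases h2 : cnt y < cnt z
        · exact Or.inl h2
        · exact Or.inr ⟨by omega, hlt y (List.mem_cons_self)⟩
      · exact hy z hz

lemma foldl_insertBy_pairwise (cnt : Char → Int) (rk : Char → Nat) :
    ∀ (l acc : List Char), acc.Pairwise (LexR cnt rk) →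
    (∀ a ∈ acc, ∀ x ∈ l, rk a < rk x) → l.Pairwise (fun a b => rk a < rk b) →
    (l.foldl (fun acc x => PySem.List.insertBy (fun a b => decide (cnt a < cnt b)) x acc) acc).Pairwise (LexR cnt rk) := by
  intro l
  induction l with
  | nil => intro acc h _ _; simpa using h
  | cons x l' ih =>
    intro acc hacc hlt hl
    rw [List.pairwise_cons] at hl
    simp only [List.foldl_cons]
    refine ih _ (insertBy_pairwise cnt rk x acc hacc
        (fun y hy => hlt y hy x (List.mem_cons_self))) ?_ hl.2
    intro a ha z hz
    rcases (PySem.List.mem_insertBy _ _ _ _).mp ha with rfl | ha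
    · exact hl.1 z hz
    · exact hlt a ha z (List.mem_cons_of_mem _ hz)

lemma sorted_pairwise_stable (xs : List Char) (cnt : Char → Int) (hnd : xs.Nodup) :
    (PySem.List.sorted xs cnt false).Pairwise (LexR cnt (fun c => List.idxOf c xs)) := by
  rw [PySem.List.sorted_eq_foldl_insertBy]
  refine foldl_insertBy_pairwise cnt _ xs [] (by simp) (by simp) ?_
  rw [List.pairwise_iff_getElem]
  intro i j hi hj hij
  simpa [List.Nodup.idxOf_getElem hnd i hi, List.Nodup.idxOf_getElem hnd j hj] using hij

-- ## A's dict is Counter(chars)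
lemma dictsA_eq (data : List String) (n : Nat) (hn : ∀ s ∈ data, n < s.toList.length) :
    data.foldl (fun d j =>
      match PySem.Str.pyGet? j (n : Int) with
      | some c => if d.contains c then d.modify c 0 (· + 1) else d.insert c 1
      | none => d) (PySem.Dict.empty : PySem.Dict Char Int)
    = PySem.Dict.counter (data.map (chAt n)) := by
  rw [PySem.List.foldl_congr_mem data _
      (fun d j => d.modify (chAt n j) 0 (· + 1)) _ ?_]
  · rw [PySem.Dict.counter_eq_foldl, List.foldl_map]
  · intro d j hj
    rw [pyGet?_chAt j n (hn j hj)]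
    by_cases hc : d.contains (chAt n j)
    · simp [hc]
    · have h0 : d.getD (chAt n j) 0 = 0 :=
        PySem.Dict.getD_of_not_contains d 0 (by simpa using hc)
      simp [hc, PySem.Dict.modify, h0]

-- ## B's pair fold splits into the counts fold and the order fold over the char list
lemma cdfold_split (n : Nat) :
    ∀ (l : List String) (p : PySem.Dict Char Int × PySem.Dict Char Int),
    (∀ s ∈ l, PySem.Str.pyGet? s (n : Int) = some (chAt n s)) →
    l.foldl (fun cd item =>
      match PySem.Str.pyGet? item (n : Int) with
      | some c =>
          (cd.1.insert c (cd.1.getD c 0 + 1),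
           if cd.2.contains c then cd.2 else cd.2.insert c (cd.2.size : Int))
      | none => cd) p
    = ((l.map (chAt n)).foldl (fun d c => d.insert c (d.getD c 0 + 1)) p.1,
       (l.map (chAt n)).foldl (fun d c => if d.contains c then d else d.insert c (d.size : Int)) p.2) := by
  intro l
  induction l with
  | nil => intro p _; rfl
  | cons s l' ih =>
    intro p h
    have hs := h s (List.mem_cons_self)
    simp only [List.foldl_cons, List.map_cons, hs]
    exact ih _ (fun t ht => h t (List.mem_cons_of_mem _ ht))

-- ## the order dict: value at c is the first-appearance rank, i.e. idxOf in Set.ofList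
def ordFold (cs : List Char) : PySem.Dict Char Int :=
  cs.foldl (fun d c => if d.contains c then d else d.insert c (d.size : Int)) PySem.Dict.empty

lemma ordFold_spec (cs : List Char) :
    (ordFold cs).size = (PySem.Set.ofList cs).length ∧
    ∀ c, (ordFold cs).get? c =
      if c ∈ cs then some ((List.idxOf c (PySem.Set.ofList cs) : Int)) else none := by
  induction cs using List.reverseRecOn with
  | nil => exact ⟨rfl, fun c => by simp [ordFold, PySem.Dict.get?_empty]⟩
  | append_singleton l x ih =>
    obtain ⟨ihs, ihg⟩ := ih
    have hfold : ordFold (l ++ [x])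
        = (if (ordFold l).contains x then ordFold l
           else (ordFold l).insert x ((ordFold l).size : Int)) := by
      simp [ordFold, List.foldl_append]
    have hset : PySem.Set.ofList (l ++ [x])
        = PySem.Set.add (PySem.Set.ofList l) x := by
      simp [PySem.Set.ofList, List.foldl_append]
    have hcont : (ordFold l).contains x = decide (x ∈ l) := by
      rw [PySem.Dict.contains_eq_isSome_get?, ihg x]
      by_cases hx : x ∈ l <;> simp [hx]
    have hmemS : ∀ c, c ∈ PySem.Set.ofList l ↔ c ∈ l := fun c => PySem.Set.mem_ofList l c
    by_cases hx : x ∈ l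
    · have hadd : PySem.Set.add (PySem.Set.ofList l) x = PySem.Set.ofList l := by
        unfold PySem.Set.add
        simp [List.contains_eq_mem, (hmemS x).mpr hx]
      rw [hfold, hcont]
      simp only [hx, decide_true, if_true]
      refine ⟨by rw [hset, hadd]; exact ihs, ?_⟩
      intro c
      rw [ihg c, hset, hadd]
      by_cases hc : c ∈ l
      · simp [List.mem_append, hc]
      · have : ¬ c ∈ l ++ [x] := by
          simp [List.mem_append]
          exact ⟨hc, by rintro rfl; exact hc hx⟩
        simp [hc, this]
    · have hadd : PySem.Set.add (PySem.Set.ofList l) x = PySem.Set.ofList l ++ [x] := by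
        unfold PySem.Set.add
        simp [List.contains_eq_mem, (hmemS x)]
        intro hkk
        exact absurd hkk hx
      rw [hfold, hcont]
      simp only [hx, decide_false, Bool.false_eq_true, if_false]
      constructor
      · rw [hset, hadd, PySem.Dict.size_insert]
        simp [hcont, hx, ihs]
      · intro c
        rw [PySem.Dict.get?_insert, hset, hadd]
        by_cases hcx : c = x
        · subst hcx
          have hnm : ¬ c ∈ PySem.Set.ofList l := fun hh => hx ((hmemS c).mp hh)
          simp [List.idxOf_append_of_notMem hnm, ihs, List.mem_append]
        · rw [if_neg hcx, ihg c]
          by_cases hc : c ∈ l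
          · have hcs : c ∈ PySem.Set.ofList l := (hmemS c).mpr hc
            simp [hc, hcx, List.mem_append, List.idxOf_append_of_mem hcs]
          · have : ¬ c ∈ l ++ [x] := by simp [List.mem_append, hc, hcx]
            simp [hc, this]

-- ## B's best fold is the argmin by (count, rank)
def stepBest (lexkey : Char → Int × Int) (b : Option ((Int × Int) × Char)) (c : Char) :
    Option ((Int × Int) × Char) :=
  match b with
  | none => some (lexkey c, c)
  | some (bk, bc) =>
      if (lexkey c).1 < bk.1 ∨ ((lexkey c).1 = bk.1 ∧ (lexkey c).2 < bk.2)
      then some (lexkey c, c) else some (bk, bc)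

def LexLe (p q : Int × Int) : Prop := p.1 < q.1 ∨ (p.1 = q.1 ∧ p.2 ≤ q.2)

lemma bestFold_spec (lexkey : Char → Int × Int) :
    ∀ (l : List Char) (m0 : Char) (k : Int × Int) (m : Char),
    l.foldl (stepBest lexkey) (some (lexkey m0, m0)) = some (k, m) →
    k = lexkey m ∧ (m = m0 ∨ m ∈ l) ∧ LexLe k (lexkey m0) ∧ ∀ c ∈ l, LexLe k (lexkey c) := by
  intro l
  induction l with
  | nil =>
    intro m0 k m h
    simp only [List.foldl_nil, Option.some.injEq, Prod.mk.injEq] at h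
    obtain ⟨rfl, rfl⟩ := h
    exact ⟨rfl, Or.inl rfl, Or.inr ⟨rfl, le_refl _⟩, by simp⟩
  | cons c l' ih =>
    intro m0 k m h
    simp only [List.foldl_cons] at h
    by_cases hlt : (lexkey c).1 < (lexkey m0).1 ∨ ((lexkey c).1 = (lexkey m0).1 ∧ (lexkey c).2 < (lexkey m0).2)
    · rw [show stepBest lexkey (some (lexkey m0, m0)) c = some (lexkey c, c) by
        simp [stepBest, hlt]] at h
      obtain ⟨h1, h2, h3, h4⟩ := ih c k m h
      refine ⟨h1, ?_, ?_, ?_⟩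
      · rcases h2 with rfl | h2
        · exact Or.inr (List.mem_cons_self)
        · exact Or.inr (List.mem_cons_of_mem _ h2)
      · unfold LexLe at h3 ⊢
        rcases h3 with h3 | ⟨h3, h3'⟩ <;> rcases hlt with hlt | ⟨hlt, hlt'⟩ <;>
          first
          | exact Or.inl (by omega)
          | exact Or.inr ⟨by omega, by omega⟩
      · intro z hz
        rcases List.mem_cons.mp hz with rfl | hz
        · exact h3
        · exact h4 z hz
    · rw [show stepBest lexkey (some (lexkey m0, m0)) c = some (lexkey m0, m0) by
        simp [stepBest, hlt]] at h
      obtain ⟨h1, h2, h3, h4⟩ := ih m0 k m h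
      push Not at hlt
      refine ⟨h1, ?_, h3, ?_⟩
      · rcases h2 with rfl | h2
        · exact Or.inl rfl
        · exact Or.inr (List.mem_cons_of_mem _ h2)
      · intro z hz
        rcases List.mem_cons.mp hz with rfl | hz
        · obtain ⟨hl1, hl2⟩ := hlt
          unfold LexLe at h3 ⊢
          by_cases he : (lexkey z).1 = (lexkey m0).1
          · have hm2 := hl2 he
            rcases h3 with h3 | ⟨h3, h3'⟩
            · exact Or.inl (by omega)
            · exact Or.inr ⟨by omega, by omega⟩
          · exact Or.inl (by rcases h3 with h3 | ⟨h3, h3'⟩ <;> omega)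
        · exact h4 z hz

lemma bestFold_some (lexkey : Char → Int × Int) :
    ∀ (l : List Char) (p : (Int × Int) × Char),
    ∃ q, l.foldl (stepBest lexkey) (some p) = some q := by
  intro l
  induction l with
  | nil => exact fun p => ⟨p, rfl⟩
  | cons c l' ih =>
    intro p
    simp only [List.foldl_cons]
    unfold stepBest
    by_cases h : (lexkey c).1 < p.1.1 ∨ ((lexkey c).1 = p.1.1 ∧ (lexkey c).2 < p.1.2)
    · simpa [h] using ih (lexkey c, c)
    · simpa [h] using ih p

-- ===== round lemma =====
lemma prefix_snoc (re : List Char) (c : Char) (l : List Char) (h : re.length < l.length) :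
    (re ++ [c] <+: l) ↔ (re <+: l ∧ l.getD re.length ' ' = c) := by
  constructor
  · intro hp
    refine ⟨(List.prefix_append re [c]).trans hp, ?_⟩
    obtain ⟨t, rfl⟩ := hp
    rw [List.getD_eq_getElem?_getD, List.append_assoc,
        List.getElem?_append_right (le_refl re.length)]
    simp
  · rintro ⟨⟨t, rfl⟩, hg⟩
    cases t with
    | nil => simp at h
    | cons c' t' =>
      have hc : c' = c := by
        rw [List.getD_eq_getElem?_getD,
            List.getElem?_append_right (le_refl re.length)] at hg
        simpa using hg
      subst hc
      exact ⟨t', by simp⟩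

lemma round_both (data : List String) (n : Nat) (i : Int)
    (hi : i = (n : Int))
    (hn : ∀ s ∈ data, n < s.toList.length) (re : List Char) (hre : re.length = n)
    (hex : ∃ item ∈ data, re <+: item.toList) :
    stepB data (re, data.filter (fun item => PySem.Chars.startswith item.toList re)) i
      = (stepA data re i,
         data.filter (fun item => PySem.Chars.startswith item.toList (stepA data re i)))
    ∧ (stepA data re i).length = n + 1
    ∧ ∃ item ∈ data, (stepA data re i) <+: item.toList := by
  subst hi
  have h1 : ∀ s ∈ data, PySem.Str.pyGet? s (n : Int) = some (chAt n s) :=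
    fun s hs => pyGet?_chAt s n (hn s hs)
  set cs := data.map (chAt n) with hcs
  set cand := data.filter (fun item => PySem.Chars.startswith item.toList re) with hcand
  set csC := cand.map (chAt n) with hcsC
  have hsubC : ∀ c ∈ csC, c ∈ cs := by
    intro c hc
    obtain ⟨item, hitem, rfl⟩ := List.mem_map.mp hc
    exact List.mem_map.mpr ⟨item, (List.mem_filter.mp hitem).1, rfl⟩
  set cnt : Char → Int := fun c => ((cs.count c : Nat) : Int) with hcnt
  set rk : Char → Nat := fun c => List.idxOf c (PySem.Set.ofList cs) with hrk
  set lexkey : Char → Int × Int := fun c => (cnt c, (rk c : Int)) with hlexkey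
  -- the Bool identity behind both the any-scan and the filter step
  have hbool : ∀ c, ∀ item ∈ data,
      (PySem.Chars.startswith item.toList (re ++ [c]))
        = (PySem.Chars.startswith item.toList re
            && (PySem.Str.pyGet? item (n : Int) == some c)) := by
    intro c item hitem
    have hl := hn item hitem
    rw [h1 item hitem, Bool.eq_iff_iff]
    simp only [Bool.and_eq_true, beq_iff_eq, Option.some.injEq, PySem.Chars.startswith_iff]
    rw [prefix_snoc re c item.toList (by omega)]
    simp [chAt, hre]
  have hPiff : ∀ k,
      ((data.any (fun item => PySem.Chars.startswith item.toList (re ++ [k]))) = true)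
        ↔ k ∈ csC := by
    intro k
    rw [List.any_eq_true]
    constructor
    · rintro ⟨item, hitem, hsw⟩
      rw [hbool k item hitem, Bool.and_eq_true, beq_iff_eq] at hsw
      refine List.mem_map.mpr ⟨item, List.mem_filter.mpr ⟨hitem, hsw.1⟩, ?_⟩
      have := hsw.2
      rw [h1 item hitem] at this
      simpa using this
    · intro hk
      obtain ⟨item, hitem, rfl⟩ := List.mem_map.mp hk
      obtain ⟨hid, hsw⟩ := List.mem_filter.mp hitem
      refine ⟨item, hid, ?_⟩
      rw [hbool _ item hid, Bool.and_eq_true, beq_iff_eq]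
      exact ⟨hsw, by rw [h1 item hid]⟩
  -- A side
  have hdictsA := dictsA_eq data n hn
  have hnd : (PySem.Set.ofList cs).Nodup := PySem.Set.nodup_ofList cs
  have hpw := sorted_pairwise_stable (PySem.Set.ofList cs) cnt hnd
  have hperm := PySem.List.sorted_perm (PySem.Set.ofList cs) cnt false
  obtain ⟨w, hw, hwp⟩ := hex
  have hwc : chAt n w ∈ csC :=
    List.mem_map.mpr ⟨w, List.mem_filter.mpr ⟨hw, (PySem.Chars.startswith_iff _ _).mpr hwp⟩, rfl⟩
  have hkeyfun : (fun k => (PySem.Dict.counter cs).getD k 0) = cnt := by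
    funext k; exact PySem.Dict.getD_counter cs k
  have hstepA :
      stepA data re (n : Int)
        = match (PySem.List.sorted (PySem.Set.ofList cs) cnt false).find?
            (fun key => data.any (fun item => PySem.Chars.startswith item.toList (re ++ [key]))) with
          | some key => re ++ [key]
          | none => re := by
    simp only [stepA]
    rw [hdictsA, PySem.Dict.keys_counter, hkeyfun]
  cases hfind : (PySem.List.sorted (PySem.Set.ofList cs) cnt false).find?
      (fun key => data.any (fun item => PySem.Chars.startswith item.toList (re ++ [key]))) with
  | none =>
    exfalso
    have hall := List.find?_eq_none.mp hfind
    have hm : chAt n w ∈ PySem.List.sorted (PySem.Set.ofList cs) cnt false :=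
      (PySem.List.mem_sorted _ _ _ _).mpr ((PySem.Set.mem_ofList _ _).mpr (hsubC _ hwc))
    exact absurd ((hPiff (chAt n w)).mpr hwc) (by simpa using hall _ hm)
  | some cA =>
    have hA : stepA data re (n : Int) = re ++ [cA] := by rw [hstepA, hfind]
    obtain ⟨hPcA, as, bs, hsplit, hfail⟩ := List.find?_eq_some_iff_append.mp hfind
    have hAmem : cA ∈ csC := (hPiff cA).mp hPcA
    have hAmin : ∀ k, k ∈ csC → k = cA ∨ LexR cnt rk cA k := by
      intro k hk
      have hkS : k ∈ PySem.List.sorted (PySem.Set.ofList cs) cnt false :=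
        (PySem.List.mem_sorted _ _ _ _).mpr ((PySem.Set.mem_ofList _ _).mpr (hsubC _ hk))
      rw [hsplit] at hkS hpw
      rcases List.mem_append.mp hkS with hka | hkb
      · exact absurd ((hPiff k).mpr hk) (by simpa using hfail k hka)
      · rcases List.mem_cons.mp hkb with rfl | hkb
        · exact Or.inl rfl
        · exact Or.inr ((List.pairwise_cons.mp (List.pairwise_append.mp hpw).2.1).1 k hkb)
    -- B side
    have hcd := cdfold_split n data (PySem.Dict.empty, PySem.Dict.empty) h1
    have hordD : ∀ c ∈ cs, (ordFold cs).getD c 0 = (rk c : Int) := by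
      intro c hc
      have := (ordFold_spec cs).2 c
      rw [if_pos (by simpa [hcs] using hc)] at this
      rw [PySem.Dict.getD_eq_get?_getD, this]
      rfl
    have hbest : cand.foldl (fun (b : Option ((Int × Int) × Char)) item =>
        match PySem.Str.pyGet? item ((n : Nat) : Int) with
        | some c =>
            let k : Int × Int := ((PySem.Dict.counter cs).getD c 0, (ordFold cs).getD c 0)
            match b with
            | none => some (k, c)
            | some (bk, bc) =>
                if k.1 < bk.1 ∨ (k.1 = bk.1 ∧ k.2 < bk.2) then some (k, c) else some (bk, bc)
        | none => b) none = csC.foldl (stepBest lexkey) none := by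
      rw [PySem.List.foldl_congr_mem cand _
          (fun b item => stepBest lexkey b (chAt n item)) none ?_]
      · exact (List.foldl_map).symm
      · intro b item hitem
        have hid : item ∈ data := (List.mem_filter.mp hitem).1
        have hcsm : chAt n item ∈ cs := List.mem_map.mpr ⟨item, hid, rfl⟩
        rw [h1 item hid]
        have e1 : (PySem.Dict.counter cs).getD (chAt n item) 0 = cnt (chAt n item) :=
          PySem.Dict.getD_counter cs _
        have e2 : (ordFold cs).getD (chAt n item) 0 = (rk (chAt n item) : Int) :=
          hordD _ hcsm
        rcases b with _ | ⟨bk, bc⟩ <;> simp [stepBest, e1, e2, hlexkey]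
    cases hcsCe : csC with
    | nil => exact absurd hwc (by rw [hcsCe]; simp)
    | cons c0 restC =>
      obtain ⟨⟨k, m⟩, hq⟩ := bestFold_some lexkey restC (lexkey c0, c0)
      obtain ⟨hkm, hmmem, hle0, hlerest⟩ := bestFold_spec lexkey restC c0 k m hq
      have hfoldB : csC.foldl (stepBest lexkey) none = some (k, m) := by
        rw [hcsCe]
        simpa [stepBest] using hq
      have hmC : m ∈ csC := by
        rw [hcsCe]
        rcases hmmem with rfl | hmm
        · exact List.mem_cons_self
        · exact List.mem_cons_of_mem _ hmm
      have hBmin : ∀ c ∈ csC, LexLe k (lexkey c) := by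
        intro c hc
        rw [hcsCe] at hc
        rcases List.mem_cons.mp hc with rfl | hc
        · exact hle0
        · exact hlerest c hc
      have hmA : m = cA := by
        rcases hAmin m hmC with h | h
        · exact h
        · exfalso
          have hB := hBmin cA hAmem
          rw [hkm] at hB
          unfold LexR at h
          unfold LexLe at hB
          simp only [hlexkey] at hB
          rcases h with h | ⟨h, h'⟩ <;> rcases hB with hB | ⟨hB, hB'⟩ <;> omega
      -- assemble the round
      have hfilter : cand.filter (fun item => PySem.Str.pyGet? item ((n : Nat) : Int) == some cA)
          = data.filter (fun item => PySem.Chars.startswith item.toList (re ++ [cA])) := by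
        rw [hcand, List.filter_filter]
        apply List.filter_congr
        intro item hitem
        rw [Bool.and_comm]
        exact (hbool cA item hitem).symm
      refine ⟨?_, by simp [hA, hre], ?_⟩
      · simp only [stepB]
        rw [hcd]
        simp only [PySem.Dict.foldl_insert_getD_add_one_eq_counter]
        rw [show (data.map (chAt n)).foldl
            (fun (d : PySem.Dict Char Int) c => if d.contains c then d else d.insert c (d.size : Int))
            PySem.Dict.empty = ordFold cs from rfl]
        rw [hbest, hfoldB, hA]
        simp only [hmA]
        exact congrArg _ hfilter
      · obtain ⟨item, hitem, hsw⟩ := List.any_eq_true.mp hPcA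
        exact ⟨item, hitem, by rw [hA]; exact (PySem.Chars.startswith_iff _ _).mp hsw⟩

-- ===== VERDICT (by name: the statement is the Claim_ definition above) =====
theorem many_arr_spec : Claim_equal_many_arr := by
  intro data hdom hpre
  unfold Spec_many_arr
  by_cases hd : data = []
  · subst hd; rfl
  · have hn : ∀ (m : Nat), m < 4 → ∀ s ∈ data, m < s.toList.length := by
      intro m hm s hs
      have := hpre s hs
      omega
    have hfil0 : data.filter (fun item => PySem.Chars.startswith item.toList ([] : List Char))
        = data :=
      List.filter_eq_self.mpr fun a _ => (PySem.Chars.startswith_iff _ _).mpr (List.nil_prefix)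
    obtain ⟨w0, hw0⟩ := List.exists_mem_of_ne_nil data hd
    obtain ⟨hB0, hL1, hex1⟩ :=
      round_both data 0 0 (by norm_num) (hn 0 (by norm_num)) [] rfl ⟨w0, hw0, List.nil_prefix⟩
    obtain ⟨hB1, hL2, hex2⟩ :=
      round_both data 1 1 (by norm_num) (hn 1 (by norm_num)) _ hL1 hex1
    obtain ⟨hB2, hL3, hex3⟩ :=
      round_both data 2 2 (by norm_num) (hn 2 (by norm_num)) _ hL2 hex2
    obtain ⟨hB3, _, _⟩ :=
      round_both data 3 3 (by norm_num) (hn 3 (by norm_num)) _ hL3 hex3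
    unfold many_arr many_arr_alt
    rw [show PySem.List.pyRange 0 4 1 = [0, 1, 2, 3] from rfl]
    simp only [List.foldl_cons, List.foldl_nil]
    rw [show (([] : List Char), data)
        = (([] : List Char), data.filter (fun item => PySem.Chars.startswith item.toList ([] : List Char)))
        from by rw [hfil0]]
    rw [hB0, hB1, hB2, hB3]
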